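/-
  SEGMENT C7 OF `start_decoder` (0x1146d2–0x1146ef + 0x1149ba–0x1149f1; stb_vorbis_fixed.c 3846–3848) SPLIT IN TWO at the entry of its
  out-of-line failure piece, and THE `Built` CARRIER over the footprint of compute_codewords / compute_sorted_huffman.

      if (!compute_codewords(c, lengths, c->entries, values)) {     0x1146d2  lea rdi,[r14+4] ; check load4 ; mov edx,[r14+4] ; rcx = r12 ;
                                                                              rsi = rbx ; rdi = r14 ; 0x1146e8 call compute_codewords → cut115 = 0x1146ed
                                                                    0x1146ed  test eax,eax ; je 0x1149ba          (else 0x1146f5 = `AtC8`)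
         if (c->sparse) setup_temp_free(f, values, 0);              0x1149ba  mov rbp,[rsp+18H] ; check load1 c+1BH ; cmp byte [r14+1BH],0 ; jne 0x1149e1
                                                                    0x1149e1  edx = 0 ; rsi = r12 ; rdi = rbp ; 0x1149ec call setup_temp_free → jmp 0x1149cf
         return error(f, VORBIS_invalid_setup);                     0x1149cf  esi = 14H ; rdi = rbp ; 0x1149d7 call error ; jmp 0x113b22 (`AtERR`)
      }

      StartDecoder.C7.*           THE `Built` CARRIER (for C7 AND C8, which calls compute_sorted_huffman with the same blocks): `GoodWin`,
                                  `built_through`, `frame_through` (over a footprint of good windows), `cur_frame`, `built_frame` (the same over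
                                  `Block.Kept` premises), `blkT` + `blkT_live` (the block predicate to instantiate the callee with),
                                  `codewordsPre_of_built` (compute_codewords' precondition), `codewords_through` (its footprint consists of
                                  good windows), `sameExcept_drop_shadow` / `sameExcept_weaken`, `usedCount_same` / `longCount_same`,
                                  `cb_range` / `cb_site` (the struct `cb(i)`: where it is, a check site inside it), `built_bounds`;
                                  THE ERROR EXIT THAT BREAKS THE ARENA LAYER (setup_temp_free through its machine-level contract):
                                  `FailWin`, `failed_carry` (`Failed` from CUR(i) over stack + `[f+132, f+144)`), `fail_exit` (the whole `AtERR`)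
      StartDecoder.InC7F          the assertion at 0x1149ba (`L.start_decoder.at_1149ba`): compute_codewords returned 0
      StartDecoder.SegC7a         AtC7 → AtC8 | AtC7F                  0x1146d2–0x1146ef   (9 instructions, 2 calls: the check, compute_codewords)
      StartDecoder.SegC7b         AtC7F → AtERR                        0x1149ba–0x1149f1   (14 instructions, 3 calls: the check, setup_temp_free, error)
      StartDecoder.SegC7.of_parts SegC7a → SegC7b → SegC7   (the claim `SegC7` of Vorbis/Spec/StartDecoderA.lean is unchanged; `ReachVia.trans`, no machine step)

  WHAT IS LIVE AT 0x1149ba (c/vorbis_f.dis 1149ba … 1149f1): `[rsp+18H]` = f (`Cur.slot_f`; loaded into rbp, the first argument of both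
  calls), r14 = c (`Cur.r14`; the check and the load of `c->sparse` at `[r14+1BH]`), r12 = values (`Built.r12`; the second argument of
  setup_temp_free, read only when `c->sparse ≠ 0`). eax is NOT read again (error's result replaces it); `InC7F.result` records it only
  because the `je` establishes it. rbx (= lengths) is dead. The temp blocks P3 P2 P1 of a sparse book are still outstanding: `Built` says so
  (`sparse_temps`), and `AtERR`'s `Failed` (SD.ERR + `ArenaErr`) does not ask for them to be released (deinit frees the arena whole).
-/
import Vorbis.Spec.StartDecoderA
import Vorbis.Spec.StartDecoderC4
import Vorbis.Spec.StartDecoder2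
import Vorbis.Spec.Codebook
import Vorbis.LabelsAt
namespace Vorbis.Spec.StartDecoder
open X86 X86.User Asan

set_option maxRecDepth 4000
set_option maxHeartbeats 1000000

namespace C7

/-- A window of a footprint that lies in the shadow region may be dropped when the shadow region reads the same (the net
effect of a protected callee on the shadow is nil). -/
theorem sameExcept_drop_shadow {ws ws' : List Span} {m m' : Mem} (h : Mem.SameExcept ws m m')
    (hsh : Mem.EqOn 0xC00000 0xE00000 m m')
    (hsub : ∀ w, w ∈ ws → w ∈ ws' ∨ (0xC00000 ≤ w.lo ∧ w.hi ≤ 0xE00000)) : Mem.SameExcept ws' m m' := by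
  intro a ha
  by_cases hin : 0xC00000 ≤ a.toNat ∧ a.toNat < 0xE00000
  · exact hsh a hin.1 hin.2
  · apply h
    intro w hw
    rcases hsub w hw with h1 | h2
    · exact ha w h1
    · omega

/-- The counts of the used lengths agree when the bytes of the array agree. -/
theorem usedCount_same {mem mem' : Mem} {p n : Nat} (hs : Mem.EqOn p (p + n) mem mem') (hb : p + n ≤ 2 ^ 64) :
    usedCount mem' p n = usedCount mem p n := by
  unfold usedCount
  apply countBelow_congr
  intro j hj
  unfold usedP
  rw [hs.u8 (p + j) (by omega) (by omega) hb]

/-- The counts of the long lengths agree when the bytes of the array agree. -/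
theorem longCount_same {mem mem' : Mem} {p n : Nat} (hs : Mem.EqOn p (p + n) mem mem') (hb : p + n ≤ 2 ^ 64) :
    longCount mem' p n = longCount mem p n := by
  unfold longCount
  apply countBelow_congr
  intro j hj
  unfold longP
  rw [hs.u8 (p + j) (by omega) (by omega) hb]

/-- **CUR(i) over a change of memory that keeps `*f`, the spill slots `[R+8, R+38H)`, the shadow and every block of the
head-of-iteration snapshot** (a push, a callee that writes only young tables / temp blocks / its own stack): CUR(i) again, the
struct `cb(i)` is the same struct and reads the same.
WHEN: you have the `Block.Kept` / `Mem.EqOn` premises at hand (a single store). Over a callee's footprint use `built_through`, which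
discharges them window by window. HOW: `hobj` by `Block.Kept.of_sameExcept`; `hold` by `AllKept` of the arena layer
(`ArenaOK.allKept_of_since` …); the result's second and third component rewrite `g.cb`, and the fields of the struct, to the old memory. -/
theorem cur_frame {g : Ghost} {i : Nat} {A2 A3 Ai : Arena} {A : Arena × List Obj} {v v' : State}
    (h : Cur g i A2 A3 Ai A v)
    (hobj : (objBlock g.f).Kept v.mem v'.mem)
    (hsl : Mem.EqOn (g.R + 8) (g.R + 0x38) v.mem v'.mem) (hRb : g.R + 0x38 ≤ 2 ^ 64)
    (hsh : Mem.EqOn 0xC00000 0xE00000 v.mem v'.mem)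
    (hold : AllKept Ai.Blk v.mem v'.mem)
    (r14 : v'.reg .r14 = v.reg .r14) :
    Cur g i A2 A3 Ai A v' ∧ g.cb v'.mem i = g.cb v.mem i ∧ Codebook.SameFields v.mem v'.mem (g.cb v.mem i) := by
  have hfb : g.f + Off.sizeof.stb_vorbis ≤ 2 ^ 64 := by
    have := hobj.inside
    simp only [vblock] at this
    exact this
  have hs : ObjSame g.f v.mem v'.mem := ObjEq.of_kept_obj hobj (by decide)
  have hw : ObjEq BookTrans.wins v.mem g.f v'.mem g.f := ObjEq.of_kept_obj hobj (by decide)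
  have ecnt : stb_vorbis.codebook_count v'.mem g.f = stb_vorbis.codebook_count v.mem g.f := by
    simp only [vacc, voff]
    exact hs.i32 160 (by decide)
  have ecbs : stb_vorbis.codebooks v'.mem g.f = stb_vorbis.codebooks v.mem g.f := by
    simp only [vacc, voff]
    exact hs.u64 168 (by decide)
  have ecb : g.cb v'.mem i = g.cb v.mem i := by
    unfold Ghost.cb
    simp only [stb_vorbis.codebooks_at]
    rw [ecbs]
  have hcbOK := h.ages.cbOK
  have hcbK : (codebooksBlock v.mem g.f).Kept v.mem v'.mem := hold _ hcbOK.F2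
  have hstruct : (Codebook.block (g.cb v.mem i)).Kept v.mem v'.mem := hcbOK.cb_kept hcbK i h.lt
  have hsf : Codebook.SameFields v.mem v'.mem (g.cb v.mem i) := Codebook.SameFields.of_kept hstruct
  have efirst : stb_vorbis.first_decode v'.mem g.f = stb_vorbis.first_decode v.mem g.f := by
    simp only [vacc, voff]
    exact hs.u8 1749 (by decide)
  have edisc : stb_vorbis.discard_samples_deferred v'.mem g.f = stb_vorbis.discard_samples_deferred v.mem g.f := by
    simp only [vacc, voff]
    exact hs.i32 1784 (by decide)
  have hobjE : Mem.EqOn g.f (g.f + Off.sizeof.stb_vorbis) v.mem v'.mem := by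
    have := hobj.same
    simp only [vblock] at this
    exact this
  refine ⟨?_, ecb, hsf⟩
  refine
    { sd := ?_
      hand := h.hand
      ages := h.ages.frame_old hw hold
      zf := ?_
      lt := ?_
      slot_f := ?_
      slot_i := ?_
      r14 := ?_ }
  · -- the weaker form of SD 3
    refine
      { env := h.sd.env.eqOn hsh
        frame := h.sd.frame.frame (hsl.mono (Nat.le_refl _) (by omega)) (by omega)
        arena := ?_
        setups := h.sd.setups
        bits := h.sd.bits.frame hs
        first := ?_
        discard0 := ?_
        header := fun h1 => (h.sd.header h1).frame hs
        cb0 := ?_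
        rest := ?_ }
    · apply h.sd.arena.frame hfb
      simp only [voff] at hfb hobjE ⊢
      exact hobjE.mono (by omega) (by omega)
    · rw [efirst]
      exact h.sd.first
    · rw [edisc]
      exact h.sd.discard0
    · intro h3
      refine ⟨(h.sd.cb0 h3).1.frame hs, ?_⟩
      rw [ecbs]
      exact (h.sd.cb0 h3).2
    · have hr := h.sd.rest
      unfold RestZero at hr ⊢
      apply hr.frame
      · simp only [restFrom, voff] at hfb hobjE ⊢
        exact hobjE.mono (by omega) (by omega)
      · simp only [voff] at hfb ⊢
        omega
  · -- ZF(i + 1)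
    rw [ecbs, ecnt]
    have hlt := h.lt
    have hF1 := hcbOK.F1
    have hsame := hcbK.same
    have hins := hcbK.inside
    simp only [vblock] at hsame hins
    apply h.zf.same
    · exact hsame.mono (by omega) (Nat.le_refl _)
    · omega
    · exact hins
  · rw [ecnt]
    exact h.lt
  · rw [hsl.u64 (g.R + 0x18) (by omega) (by omega) hRb]
    exact h.slot_f
  · rw [hsl.u32 (g.R + 0x30) (by omega) (by omega) hRb]
    exact h.slot_i
  · rw [r14, ecb]
    exact h.r14

/-- **`Built` over a change of memory that keeps `*f`, the spill slots, the shadow, every block of the snapshot `Aw` and the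
`lengths` array** (the push of a return address; compute_codewords, which writes only tables allocated since `Aw`, temp blocks
other than `lengths`, and its own stack): `Built` again, for a state with the same rbx, r12, r14.
WHEN: as `cur_frame`, for the whole `Built` (C7, C8 before its own allocations). HOW: `hlen` is the ONE content premise besides the
snapshot's blocks: `L(E)`, CNT / CNT′ read the bytes of `lengths` (`usedCount_same`, `longCount_same`). The contents of `codewords`,
`codeword_lengths`, `values` are NOT read by `Built` (VAL is a separate clause of `InC8`), so the callee may write them. -/
theorem built_frame {g : Ghost} {i : Nat} {A2 A3 Ai Aw : Arena} {A : Arena × List Obj} {lengths values : Nat} {v v' : State}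
    (h : Built g i A2 A3 Ai Aw A lengths values v)
    (hobj : (objBlock g.f).Kept v.mem v'.mem)
    (hsl : Mem.EqOn (g.R + 8) (g.R + 0x38) v.mem v'.mem) (hRb : g.R + 0x38 ≤ 2 ^ 64)
    (hsh : Mem.EqOn 0xC00000 0xE00000 v.mem v'.mem)
    (hold : AllKept Aw.Blk v.mem v'.mem)
    (hlen : (Block.mk lengths (Codebook.entries v.mem (g.cb v.mem i)).toNat).Kept v.mem v'.mem)
    (r14 : v'.reg .r14 = v.reg .r14) (rbx : v'.reg .rbx = v.reg .rbx) (r12 : v'.reg .r12 = v.reg .r12) :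
    Built g i A2 A3 Ai Aw A lengths values v' ∧ g.cb v'.mem i = g.cb v.mem i ∧
      Codebook.SameFields v.mem v'.mem (g.cb v.mem i) := by
  have holdi : AllKept Ai.Blk v.mem v'.mem := fun B hB => hold B (hB.mono h.extw)
  obtain ⟨hcur, ecb, e⟩ := cur_frame h.cur hobj hsl hRb hsh holdi r14
  have hlenE := hlen.same
  have hlenI := hlen.inside
  simp only [vblock] at hlenE hlenI
  have eused : usedCount v'.mem lengths (Codebook.entries v.mem (g.cb v.mem i)).toNat =
      usedCount v.mem lengths (Codebook.entries v.mem (g.cb v.mem i)).toNat := usedCount_same hlenE hlenI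
  have elong : longCount v'.mem lengths (Codebook.entries v.mem (g.cb v.mem i)).toNat =
      longCount v.mem lengths (Codebook.entries v.mem (g.cb v.mem i)).toNat := longCount_same hlenE hlenI
  refine ⟨?_, ecb, e⟩
  refine
    { cur := hcur
      extw := h.extw
      extw' := h.extw'
      k1 := ?_
      k2 := ?_
      rbx := ?_
      r12 := ?_
      lenL := ?_
      dense_values := ?_
      dense_lengths := ?_
      dense_codewords := ?_
      dense_eq := ?_
      dense_temps := ?_
      dense_cnt := ?_
      sparse_lengths := ?_
      sparse_temps := ?_
      sparse_cnt := ?_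
      fresh := ?_ }
  · rw [ecb]
    exact h.k1.frame e
  · rw [ecb]
    exact h.k2.frame e
  · rw [rbx]
    exact h.rbx
  · rw [r12]
    exact h.r12
  · rw [ecb, e.entries]
    exact h.lenL.same hlenE hlenI
  · rw [ecb, e.sparse]
    exact h.dense_values
  · rw [ecb, e.sparse, e.codeword_lengths, e.entries]
    exact h.dense_lengths
  · rw [ecb, e.sparse, e.codewords, e.entries]
    exact h.dense_codewords
  · rw [ecb, e.sparse, e.codeword_lengths]
    exact h.dense_eq
  · rw [ecb, e.sparse]
    exact h.dense_temps
  · rw [ecb, e.sparse]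
    intro hs
    have := h.dense_cnt hs
    unfold CNT' at this ⊢
    rw [e.entries, e.sorted_entries, elong]
    exact this
  · rw [ecb, e.sparse, e.codeword_lengths, e.sorted_entries]
    exact h.sparse_lengths
  · rw [ecb, e.sparse, e.codewords, e.sorted_entries, e.entries]
    exact h.sparse_temps
  · rw [ecb, e.sparse]
    intro hs
    have := h.sparse_cnt hs
    unfold CNT at this ⊢
    rw [e.entries, e.sorted_entries, eused]
    exact this
  · rw [ecb]
    have hf := h.fresh
    refine ⟨⟨?_, ?_, ?_⟩, ?_, ?_⟩
    · rw [e.lookup_type]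
      exact hf.lookup_type
    · rw [e.lookup_values]
      exact hf.lookup_values
    · rw [e.multiplicands]
      exact hf.multiplicands
    · rw [e.sorted_codewords]
      exact hf.sorted_codewords
    · rw [e.sorted_values]
      exact hf.sorted_values

/-- The block predicate handed to compute_codewords: the arena's setup blocks and its temp blocks (`K3t`, `lens`, `values` of a
sparse book are temp blocks).
WHEN: `have hcc' := hcc A.2 g.frames' (C7.blkT A)` BEFORE the walk (the walker takes the instance it finds); the same for
compute_sorted_huffman in C8. `A.1.Blk` alone does NOT work: `CodewordsPre.K3t` / `.lens` / `.sparse` ask for the temp blocks. -/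
def blkT (A : Arena × List Obj) : Block → Prop := fun B => A.1.Blk B ∨ A.1.TBlock B.base B.size

/-- Setup blocks and temp blocks are live (AR6). -/
theorem blkT_live {g : Ghost} {A : Arena × List Obj} {mem : Mem} (ha : ArenaOK A.1 A.2 mem g.f) :
    BlkLive (blkT A) (Live (stackObjs g.frames' ++ A.2)) := by
  intro B hB
  rcases hB with h1 | h2
  · exact ha.block_live (fun o ho => List.mem_append_right _ ho) h1
  · exact ha.tblock_live (fun o ho => List.mem_append_right _ ho) h2

/-- **compute_codewords' precondition at `AtC7`** (S3's `CodewordsPre`), for a state `s` at the callee's entry where `Built`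
holds: rdi = c, rsi = lengths, edx = entries, rcx = values.
WHEN: the goal `pre_1146e8` (`show CodewordsPre A.2 g.frames' (C7.blkT A) s_1146e8` first). HOW: `hb` is `Built` AT THE CALLEE'S ENTRY
STATE (after the push of the return address: `built_through` over the one window `[R − 8, R)`); `hsh` = `⟨hfr.shadow.untouched hun,
hfr.offText⟩` after `rw` with `(s.reg .rsp).toNat + 8 = g.R`; the register premises from the walker's `w_rdi` … and `toNat_addr`;
`hrdx` needs `Codebook.K1.ent_nonneg`. `apartSparse` is the expensive clause: the chain of the three temp blocks (`ArenaOK.AR4` with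
`temps = [P3, P2, P1]`, `simp only [List.map, TempChain]`) + `blk_tblock_disjoint` + `old_disjoint_since`. farm/worked/start_decoder.C7a. -/
theorem codewordsPre_of_built {g : Ghost} {i : Nat} {A2 A3 Ai Aw : Arena} {A : Arena × List Obj} {lengths values : Nat}
    {s : State} (hb : Built g i A2 A3 Ai Aw A lengths values s) (hsh : ShadowPre A.2 g.frames' s)
    (hrdi : (s.reg .rdi).toNat = g.cb s.mem i) (hrsi : (s.reg .rsi).toNat = lengths)
    (hrcx : (s.reg .rcx).toNat = values)
    (hrdx : (argU32 (s.reg .rdx) : Int) = Codebook.entries s.mem (g.cb s.mem i)) :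
    CodewordsPre A.2 g.frames' (blkT A) s := by
  have ha := hb.cur.sd.arena
  have hcb := hb.cur.ages.cbOK
  have hci := hcb.cb_in i hb.cur.lt
  have hcbA : A.1.Blk (codebooksBlock s.mem g.f) := hcb.F2.mono hb.cur.ages.exti
  have hn : argU32 (s.reg .rdx) = (Codebook.entries s.mem (g.cb s.mem i)).toNat := by omega
  have hk2 := hb.k2
  refine
    { shadow := hsh
      live := blkT_live ha
      book := ?_
      K1 := ?_
      K2 := ?_
      K3t := ?_
      n_eq := ?_
      lens := ?_
      k7 := ?_
      sparse := ?_
      apartDense := ?_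
      apartSparse := ?_ }
  · rw [hrdi]
    exact ⟨_, Or.inl hcbA, hci⟩
  · rw [hrdi]
    exact hb.k1
  · rw [hrdi]
    exact hk2
  · rw [hrdi]
    refine ⟨?_, ?_, ?_⟩
    · intro hs
      have h3 := hb.dense_k3 hs
      exact ⟨Or.inl h3.lengths.1, Or.inl h3.codewords.1⟩
    · intro hs
      exact Or.inl (hb.sparse_lengths hs).1
    · intro hs
      right
      exact (hb.sparse_temps hs).tblock (List.mem_cons_of_mem _ List.mem_cons_self)
  · rw [hrdi]
    exact hrdx
  · rw [hrsi, hn]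
    rcases hk2.sparse_01 with hs | hs
    · left
      have := (hb.dense_lengths hs).1.mono hb.extw'
      rw [← hb.dense_eq hs] at this
      exact this
    · right
      exact (hb.sparse_temps hs).tblock (List.mem_cons_of_mem _ (List.mem_cons_of_mem _ List.mem_cons_self))
  · rw [hrsi, hn]
    exact hb.lenL.k7at
  · rw [hrdi, hrsi, hrcx]
    intro hs
    have hs1 : Codebook.sparse s.mem (g.cb s.mem i) = 1 := hk2.sparse_01.resolve_left hs
    exact ⟨hb.sparse_cnt hs1, Or.inr ((hb.sparse_temps hs1).tblock List.mem_cons_self)⟩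
  · rw [hrdi, hrsi, hn]
    intro hs
    exact hb.apartDense hs
  · rw [hrdi, hrsi, hrcx, hn]
    intro hs
    have hs1 : Codebook.sparse s.mem (g.cb s.mem i) = 1 := hk2.sparse_01.resolve_left hs
    have hT := hb.sparse_temps hs1
    have t3 := hT.tblock (p := values) List.mem_cons_self
    have t2 := hT.tblock (p := Codebook.codewords s.mem (g.cb s.mem i)) (List.mem_cons_of_mem _ List.mem_cons_self)
    have t1 := hT.tblock (p := lengths) (List.mem_cons_of_mem _ (List.mem_cons_of_mem _ List.mem_cons_self))
    have hcl : A.1.Blk _ := (hb.sparse_lengths hs1).1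
    -- the chain of the three temp blocks
    obtain ⟨ht, hB⟩ := hT
    have hch := ha.AR4
    rw [ht] at hch
    simp only [List.map, TempChain] at hch
    obtain ⟨c1, c2, c3, _⟩ := hch
    have b3 := hB _ List.mem_cons_self
    have b2 := hB _ (List.mem_cons_of_mem _ List.mem_cons_self)
    have b1 := hB _ (List.mem_cons_of_mem _ (List.mem_cons_of_mem _ List.mem_cons_self))
    simp only at b1 b2 b3
    have r1 := le_r8 (4 * (Codebook.sorted_entries s.mem (g.cb s.mem i)).toNat)
    -- setup blocks against temp blocks
    have d1 := ha.blk_tblock_disjoint hcbA t1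
    have d2 := ha.blk_tblock_disjoint hcbA t2
    have d3 := ha.blk_tblock_disjoint hcbA t3
    have e1 := ha.blk_tblock_disjoint hcl t1
    have e2 := ha.blk_tblock_disjoint hcl t2
    have e3 := ha.blk_tblock_disjoint hcl t3
    -- the codebooks block against the young `codeword_lengths`
    have d4 := ha.old_disjoint_since hb.cur.ages.exti hcb.F2 ((hb.sparse_lengths hs1).older hb.extw)
    unfold cwBlock Codebook.clBlock
    rw [Codebook.N_sparse hs]
    unfold Ghost.cb at *
    simp only [Apart, List.pairwise_cons, List.mem_cons, or_false, forall_eq_or_imp, forall_eq,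
      List.not_mem_nil, false_imp_iff, implies_true, List.Pairwise.nil, and_true]
    simp only [vblock] at hci d1 d2 d3 d4 e1 e2 e3 ⊢
    omega

/-- The three kinds of window a footprint between `AtC7` and `AtC8` may have (besides shadow bytes that read the same): stack
bytes below the spill slots, bytes of a table allocated since the snapshot `Aw`, bytes of a temp block other than `lengths`. -/
def GoodWin (g : Ghost) (Aw : Arena) (A : Arena × List Obj) (lengths : Nat) (w : Span) : Prop :=
  (g.R - 408 ≤ w.lo ∧ w.hi ≤ g.R) ∨
  (∃ C : Block, Since Aw A.1 C ∧ C.base ≤ w.lo ∧ w.hi ≤ C.base + C.size) ∨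
  (∃ q m : Nat, A.1.TBlock q m ∧ q ≠ lengths ∧ q ≤ w.lo ∧ w.hi ≤ q + m)

/-- **`Built` through a footprint of good windows** (`built_frame` with its premises discharged block by block): the decoder
object is a stack object of the caller above `R`, outside the arena; the spill slots lie in the stack region; a block of `Aw` is
older than a table allocated since, and apart from every temp block; `lengths` is a block of `Aw` (dense) or the temp block P1.
WHEN: at the callee's entry (the push alone: `ws = [⟨g.R − 8, g.R⟩]`) and at its return (`ws` = the push :: the windows of
`codewords_through`), and at an exit whose memory is unchanged (`ws = []`, `Mem.SameExcept.refl`). C8: the same with the footprint of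
compute_sorted_huffman (it writes `sorted_codewords`, `sorted_values` — allocated since `Aw` when C8 has pushed them into the ghost
arena: use the NEW arena for `A` — and the stack); a `GoodWin` proof per window is all that is asked. HOW: `hs` always FROM THE SEGMENT'S
ENTRY STATE `v` (chain with `.trans`, widen with `sameExcept_weaken`), `hsh` the chain of the `ShadowUntouched` facts, the three register
premises by `w_kept .r14 (by decide)` …; `hRlo`, `hRhi` by `omega` from `Frame.r_eq` / `Frame.ra` (`simp only [steady, depth]`). -/
theorem built_through {g : Ghost} {i : Nat} {A2 A3 Ai Aw : Arena} {A : Arena × List Obj} {lengths values : Nat} {v v' : State}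
    (h : Built g i A2 A3 Ai Aw A lengths values v) (hinv : ShadowInv A.2 g.frames' g.R v.mem)
    (hoff : ∀ o, o ∈ A.2 → L.textHi ≤ o.base) (hRlo : 0x700000 + 408 ≤ g.R) (hRhi : g.R + 0x38 ≤ 0x800000)
    {ws : List Span} (hs : Mem.SameExcept ws v.mem v'.mem) (hsh : Mem.EqOn 0xC00000 0xE00000 v.mem v'.mem)
    (hw : ∀ w, w ∈ ws → GoodWin g Aw A lengths w)
    (r14 : v'.reg .r14 = v.reg .r14) (rbx : v'.reg .rbx = v.reg .rbx) (r12 : v'.reg .r12 = v.reg .r12) :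
    Built g i A2 A3 Ai Aw A lengths values v' ∧ g.cb v'.mem i = g.cb v.mem i ∧
      Codebook.SameFields v.mem v'.mem (g.cb v.mem i) := by
  have ha := h.cur.sd.arena
  have hb := ha.bounds
  have hAR1 := ha.AR1
  have hAR1x := ha.AR1x
  have hout := h.cur.hand.objOut
  have hfw := (h.cur.hand.obj.mono (C4.sub_frames g A)).where_ hinv hoff (by decide)
  simp only [voff] at hout hfw
  -- where the `lengths` array is
  have hlenw : ∀ w, w ∈ ws → lengths + (Codebook.entries v.mem (g.cb v.mem i)).toNat ≤ w.lo ∨ w.hi ≤ lengths := by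
    intro w hww
    rcases h.k2.sparse_01 with hsp | hsp
    · have hl := h.dense_lengths hsp
      rw [← h.dense_eq hsp] at hl
      have hlA : A.1.Blk _ := hl.1.mono h.extw'
      have hst := ha.blk_off_stack hlA
      rcases hw w hww with h1 | ⟨C, hC, c1, c2⟩ | ⟨q, m, hq, hne, c1, c2⟩
      · simp only at hst
        omega
      · have hd := ha.old_disjoint_since h.extw' hl.1 hC
        simp only [vblock] at hd
        omega
      · have hd := ha.blk_tblock_disjoint hlA hq
        simp only [vblock] at hd
        omega
    · have t1 := (h.sparse_temps hsp).tblock (p := lengths)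
        (List.mem_cons_of_mem _ (List.mem_cons_of_mem _ List.mem_cons_self))
      have hst := ha.tblock_off t1
      rcases hw w hww with h1 | ⟨C, hC, c1, c2⟩ | ⟨q, m, hq, hne, c1, c2⟩
      · omega
      · have hd := ha.blk_tblock_disjoint hC.1 t1
        simp only [vblock] at hd
        omega
      · have r1 := le_r8 m
        have r2 := le_r8 (Codebook.entries v.mem (g.cb v.mem i)).toNat
        rcases ha.tblock_apart hq t1 with e | e | e
        · exact absurd e.1 hne
        · omega
        · omega
  apply built_frame h ?_ ?_ (by omega) hsh ?_ ?_ r14 rbx r12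
  · -- `*f`
    apply Block.Kept.of_sameExcept hs
    · intro w hww
      simp only [vblock, voff]
      rcases hw w hww with h1 | ⟨C, hC, c1, c2⟩ | ⟨q, m, hq, hne, c1, c2⟩
      · omega
      · have hi := arena_inside ha hC.1
        omega
      · have hr := ha.tblock_range hq
        have r1 := le_r8 m
        omega
    · simp only [vblock, voff]
      omega
  · -- the spill slots
    apply hs.eqOn
    intro w hww
    rcases hw w hww with h1 | ⟨C, hC, c1, c2⟩ | ⟨q, m, hq, hne, c1, c2⟩
    · omega
    · have hst := ha.blk_off_stack hC.1
      omega
    · have hst := ha.tblock_off hq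
      omega
  · -- the blocks of the snapshot `Aw`
    intro B hB
    have hBA : A.1.Blk B := hB.mono h.extw'
    apply Block.Kept.of_sameExcept hs
    · intro w hww
      rcases hw w hww with h1 | ⟨C, hC, c1, c2⟩ | ⟨q, m, hq, hne, c1, c2⟩
      · have hst := ha.blk_off_stack hBA
        omega
      · have hd := ha.old_disjoint_since h.extw' hB hC
        simp only [vblock] at hd
        omega
      · have hd := ha.blk_tblock_disjoint hBA hq
        simp only [vblock] at hd
        omega
    · exact ha.blkOK.no_wrap hBA
  · -- the `lengths` array
    apply Block.Kept.of_sameExcept hs hlenw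
    simp only []
    rcases h.k2.sparse_01 with hsp | hsp
    · have hl := h.dense_lengths hsp
      rw [← h.dense_eq hsp] at hl
      have := ha.blkOK.no_wrap (hl.1.mono h.extw')
      simp only [] at this
      exact this
    · have t1 := (h.sparse_temps hsp).tblock (p := lengths)
        (List.mem_cons_of_mem _ (List.mem_cons_of_mem _ List.mem_cons_self))
      have hst := ha.tblock_off t1
      omega

/-- **The common part `Frame` through a footprint of good windows**: the slots above `R` (shadow index, saved registers, return
address), the table `log2_4` and the function's own footprint clause.
WHEN: every exit of C7a / C8 (next to `built_through`, same `hs hsh hw`). A footprint with windows INSIDE `*f` (error, setup_temp_free,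
get_bits): `P2.frame_carry_win` (Vorbis/Spec/StartDecoder2.lean) or `C4.frame_carry`. HOW: `hrsp` by `eq_addr` + `u_omega` from the
walker's `w_rsp`; `hcode` is the walker's `w_eq`; `hinv` is `w_inv` after a call, `by v_inv` otherwise. -/
theorem frame_through {u₀ : State} {g : Ghost} {pc pc' : Word} {Aw : Arena} {A : Arena × List Obj} {lengths : Nat}
    {v v' : State} (hfr : Frame u₀ g pc A v) (ha : ArenaOK A.1 A.2 v.mem g.f) (hh : g.Hand A)
    {ws : List Span} (hs : Mem.SameExcept ws v.mem v'.mem) (hsh : Mem.EqOn 0xC00000 0xE00000 v.mem v'.mem)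
    (hw : ∀ w, w ∈ ws → GoodWin g Aw A lengths w)
    (hrip : v'.rip = pc') (hrsp : v'.reg .rsp = addr g.R) (hcode : CodeOK u₀ v'.mem) (hinv : abiInv v') :
    Frame u₀ g pc' A v' := by
  obtain ⟨hRA, hR8⟩ := hfr.r_eq
  obtain ⟨_, hroom, htop⟩ := hfr.ra
  simp only [steady, depth] at hRA hroom
  have hb := ha.bounds
  have hAR1x := ha.AR1x
  -- the stack from `R` up to the return address reads the same
  have hst : Mem.EqOn g.R (g.R + 0x5d0) v.mem v'.mem := by
    apply hs.eqOn
    intro w hww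
    rcases hw w hww with h1 | ⟨C, hC, c1, c2⟩ | ⟨q, m, hq, hne, c1, c2⟩
    · omega
    · have hst := ha.blk_off_stack hC.1
      omega
    · have hst := ha.tblock_off hq
      omega
  have hlog : Mem.EqOn 0x120640 (0x120640 + 16) v.mem v'.mem := by
    have hmem : (Block.mk 0x120640 16) ∈ fixedBlocks g.len := by
      simp only [fixedBlocks, globalBlocks, List.mem_cons, true_or, or_true]
    have hout := hh.outside _ hmem
    simp only at hout
    apply hs.eqOn
    intro w hww
    rcases hw w hww with h1 | ⟨C, hC, c1, c2⟩ | ⟨q, m, hq, hne, c1, c2⟩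
    · omega
    · have hi := arena_inside ha hC.1
      omega
    · have hr := ha.tblock_range hq
      have r1 := le_r8 m
      omega
  have hb64 : g.R + 0x5d0 ≤ 2 ^ 64 := by omega
  refine
    { entry := hfr.entry
      rip := hrip
      rsp := hrsp
      shadowIdx := ?_
      saved_rbx := ?_
      saved_rbp := ?_
      saved_r12 := ?_
      saved_r13 := ?_
      saved_r14 := ?_
      saved_r15 := ?_
      saved_ra := ?_
      code := hcode
      inv := hinv
      shadow := hfr.shadow.untouched hsh
      offText := hfr.offText
      ext := hfr.ext
      callers := hfr.callers
      sh7 := ?_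
      same := ?_ }
  · rw [hst.u64 (g.R + 8) (by omega) (by omega) hb64]
    exact hfr.shadowIdx
  · rw [hst.u64 (g.R + 0x598) (by omega) (by omega) hb64]
    exact hfr.saved_rbx
  · rw [hst.u64 (g.R + 0x5a0) (by omega) (by omega) hb64]
    exact hfr.saved_rbp
  · rw [hst.u64 (g.R + 0x5a8) (by omega) (by omega) hb64]
    exact hfr.saved_r12
  · rw [hst.u64 (g.R + 0x5b0) (by omega) (by omega) hb64]
    exact hfr.saved_r13
  · rw [hst.u64 (g.R + 0x5b8) (by omega) (by omega) hb64]
    exact hfr.saved_r14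
  · rw [hst.u64 (g.R + 0x5c0) (by omega) (by omega) hb64]
    exact hfr.saved_r15
  · rw [hst.u64 (g.R + 0x5c8) (by omega) (by omega) hb64]
    exact hfr.saved_ra
  · intro j hj
    have h0 := hfr.sh7 j hj
    have e : Vorbis.Globals.log2_4.beg = 0x120640 := rfl
    rw [e] at h0 ⊢
    rw [hlog.readLE (UInt64.ofNat (0x120640 + j)) 1 ?_ ?_ ?_]
    · exact h0
    · rw [UInt64.toNat_ofNat']
      omega
    · rw [UInt64.toNat_ofNat']
      omega
    · rw [UInt64.toNat_ofNat']
      omega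
  · apply hfr.same.trans
    apply hs.mono
    intro w hww a a1 a2
    have eB := hfr.ext.B
    have eL := hfr.ext.L
    rcases hw w hww with h1 | ⟨C, hC, c1, c2⟩ | ⟨q, m, hq, hne, c1, c2⟩
    · refine ⟨⟨g.RA - depth, g.RA⟩, List.mem_cons_self, ?_, ?_⟩
      · simp only [depth]
        omega
      · simp only
        omega
    · have hi := arena_inside ha hC.1
      refine ⟨⟨g.A0.1.B, g.A0.1.B + g.A0.1.L⟩, ?_, ?_, ?_⟩
      · simp only [footprint, writes, List.mem_cons, true_or, or_true]
      · simp only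
        omega
      · simp only
        omega
    · have hr := ha.tblock_range hq
      have r1 := le_r8 m
      refine ⟨⟨g.A0.1.B, g.A0.1.B + g.A0.1.L⟩, ?_, ?_, ?_⟩
      · simp only [footprint, writes, List.mem_cons, true_or, or_true]
      · simp only
        omega
      · simp only
        omega

/-- Where the struct `cb(i)` is: in the data space, off the stack region (it lies in the codebooks block, a setup block). -/
theorem cb_range {g : Ghost} {i : Nat} {A2 A3 Ai : Arena} {A : Arena × List Obj} {v : State} (h : Cur g i A2 A3 Ai A v) :
    0x100000 ≤ g.cb v.mem i ∧ g.cb v.mem i + 2120 ≤ 0xC00000 ∧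
      (g.cb v.mem i + 2120 ≤ 0x700000 ∨ 0x800000 ≤ g.cb v.mem i) := by
  have hcb := h.ages.cbOK
  have hci := hcb.cb_in i h.lt
  have hcbA : A.1.Blk (codebooksBlock v.mem g.f) := hcb.F2.mono h.ages.exti
  have hoffc := h.sd.arena.block_off hcbA
  unfold Ghost.cb
  simp only [vblock, voff] at hci hoffc
  omega

/-- **A check site inside the struct `cb(i)`**: `n` bytes at offset `off`. -/
theorem cb_site {g : Ghost} {i : Nat} {A2 A3 Ai : Arena} {A : Arena × List Obj} {v : State} (h : Cur g i A2 A3 Ai A v)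
    (off n : Nat) (h1 : off + n ≤ 2120) (hn : 1 ≤ n) :
    Site (Live (stackObjs g.frames' ++ A.2)) (g.cb v.mem i + off) n := by
  have hcb := h.ages.cbOK
  have hci := hcb.cb_in i h.lt
  have hcbA : A.1.Blk (codebooksBlock v.mem g.f) := hcb.F2.mono h.ages.exti
  have hL : BlkLive A.1.Blk (Live (stackObjs g.frames' ++ A.2)) :=
    h.sd.arena.blkLive (fun o ho => List.mem_append_right _ ho)
  unfold Ghost.cb
  simp only [vblock, voff] at hci
  apply Site.of_blk hL hcbA
  · simp only [vblock]
    omega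
  · simp only [vblock, voff]
    omega
  · exact hn

/-- The two pointers `lengths`, `values` are addresses; `values` of a sparse book is the 8-aligned temp block P3 in the data
space (what the machine-level contract of `setup_temp_free(f, values, 0)` asks). -/
theorem built_bounds {g : Ghost} {i : Nat} {A2 A3 Ai Aw : Arena} {A : Arena × List Obj} {lengths values : Nat} {v : State}
    (h : Built g i A2 A3 Ai Aw A lengths values v) :
    lengths < 2 ^ 64 ∧ values < 2 ^ 64 ∧
      (Codebook.sparse v.mem (g.cb v.mem i) = 1 → values % 8 = 0 ∧ 0x100000 ≤ values ∧ values ≤ 0xC00000) := by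
  have ha := h.cur.sd.arena
  rcases h.k2.sparse_01 with hsp | hsp
  · have hl := h.dense_lengths hsp
    rw [← h.dense_eq hsp] at hl
    have ho := ha.block_off (hl.1.mono h.extw')
    simp only [] at ho
    have hv := h.dense_values hsp
    refine ⟨by omega, by omega, ?_⟩
    intro h1
    omega
  · have hT := h.sparse_temps hsp
    have t3 := hT.tblock (p := values) List.mem_cons_self
    have t1 := hT.tblock (p := lengths) (List.mem_cons_of_mem _ (List.mem_cons_of_mem _ List.mem_cons_self))
    have o1 := ha.tblock_off t1
    have o3 := ha.tblock_off t3
    have r3 := ha.tblock_range t3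
    refine ⟨by omega, by omega, ?_⟩
    intro _
    omega

/-- **The footprint of compute_codewords at `AtC7` consists of good windows** (its shadow bytes read the same afterwards:
the protected frame is unpoisoned again): its stack frame below `R`; dense: the `codewords` table (allocated since `Aw`);
sparse: the temp blocks P2, P3 and the final `codeword_lengths` table.
WHEN: at the return of `call compute_codewords`, with the walker's `w_same` AS IT IS (do not run `v_after_call`'s `simp` on it:
`hsame` is stated over `Spec.footprint`) and `hun := (w_post : CodewordsPost …).untouched`. HOW: `hb` = `Built` at the callee's entry
state; the result's `ws` goes into `built_through` / `frame_through` after `sameExcept_weaken` to `⟨g.R − 8, g.R⟩ :: ws`. The callee's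
own shadow window (`compute_codewords.shadowSpan`: a protected frame) is dropped by `sameExcept_drop_shadow`. For
compute_sorted_huffman write the analogue: its `footprint` unfolds by `simp only [X86.User.Spec.footprint, vspec, if_pos …]`. -/
theorem codewords_through {g : Ghost} {i : Nat} {A2 A3 Ai Aw : Arena} {A : Arena × List Obj} {lengths values : Nat}
    {s s' : State} (hb : Built g i A2 A3 Ai Aw A lengths values s)
    (hrdi : (s.reg .rdi).toNat = g.cb s.mem i) (hrcx : (s.reg .rcx).toNat = values)
    (hrsp : (s.reg .rsp).toNat = g.R - 8) (hR : 408 ≤ g.R) (hRhi : g.R ≤ 0x800000)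
    (hsame : Mem.SameExcept ((compute_codewords.spec A.2 g.frames' (blkT A)).footprint s) s.mem s'.mem)
    (hun : ShadowUntouched s.mem s'.mem) :
    ∃ ws : List Span, Mem.SameExcept ws s.mem s'.mem ∧ ∀ w, w ∈ ws → GoodWin g Aw A lengths w := by
  have ha := hb.cur.sd.arena
  have hshadow : 0xC00000 ≤ (compute_codewords.shadowSpan s).lo ∧ (compute_codewords.shadowSpan s).hi ≤ 0xE00000 := by
    unfold compute_codewords.shadowSpan
    simp only
    omega
  have hstack : GoodWin g Aw A lengths ⟨(s.reg .rsp).toNat - 400, (s.reg .rsp).toNat⟩ := by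
    left
    simp only
    omega
  rcases hb.k2.sparse_01 with hsp | hsp
  · -- dense
    have hsp' : Codebook.sparse s.mem (s.reg .rdi).toNat = 0 := by
      rw [hrdi]
      exact hsp
    simp only [X86.User.Spec.footprint, vspec, if_pos hsp'] at hsame
    refine ⟨[⟨(s.reg .rsp).toNat - 400, (s.reg .rsp).toNat⟩, (cwBlock s.mem (s.reg .rdi).toNat).span], ?_, ?_⟩
    · apply sameExcept_drop_shadow hsame hun
      intro w hw
      simp only [List.mem_cons, List.mem_nil_iff, or_false] at hw ⊢
      rcases hw with rfl | rfl | rfl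
      · exact Or.inl (Or.inl rfl)
      · exact Or.inl (Or.inr rfl)
      · exact Or.inr hshadow
    · intro w hw
      simp only [List.mem_cons, List.mem_nil_iff, or_false] at hw
      rcases hw with rfl | rfl
      · exact hstack
      · right
        left
        refine ⟨_, hb.dense_codewords hsp, ?_, ?_⟩
        · rw [hrdi]
          unfold cwBlock
          exact Nat.le_refl _
        · rw [hrdi]
          unfold cwBlock
          rw [Codebook.N_dense hsp]
          exact Nat.le_refl _
  · -- sparse
    have hne : Codebook.sparse s.mem (g.cb s.mem i) ≠ 0 := by omega
    have hsp' : Codebook.sparse s.mem (s.reg .rdi).toNat ≠ 0 := by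
      rw [hrdi]
      exact hne
    simp only [X86.User.Spec.footprint, vspec, if_neg hsp'] at hsame
    have hT := hb.sparse_temps hsp
    have t3 := hT.tblock (p := values) List.mem_cons_self
    have t2 := hT.tblock (p := Codebook.codewords s.mem (g.cb s.mem i)) (List.mem_cons_of_mem _ List.mem_cons_self)
    obtain ⟨ht, hB⟩ := hT
    have hch := ha.AR4
    rw [ht] at hch
    simp only [List.map, TempChain] at hch
    obtain ⟨c1, c2, c3, _⟩ := hch
    have b3 := hB _ List.mem_cons_self
    have b2 := hB _ (List.mem_cons_of_mem _ List.mem_cons_self)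
    have b1 := hB _ (List.mem_cons_of_mem _ (List.mem_cons_of_mem _ List.mem_cons_self))
    simp only at b1 b2 b3
    refine ⟨[⟨(s.reg .rsp).toNat - 400, (s.reg .rsp).toNat⟩, (cwBlock s.mem (s.reg .rdi).toNat).span,
      (clBlock s.mem (s.reg .rdi).toNat).span,
      ⟨(s.reg .rcx).toNat, (s.reg .rcx).toNat + 4 * (Codebook.sorted_entries s.mem (s.reg .rdi).toNat).toNat⟩], ?_, ?_⟩
    · apply sameExcept_drop_shadow hsame hun
      intro w hw
      simp only [List.mem_cons, List.mem_nil_iff, or_false] at hw ⊢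
      rcases hw with rfl | rfl | rfl | rfl | rfl
      · exact Or.inl (Or.inl rfl)
      · exact Or.inl (Or.inr (Or.inl rfl))
      · exact Or.inl (Or.inr (Or.inr (Or.inl rfl)))
      · exact Or.inl (Or.inr (Or.inr (Or.inr rfl)))
      · exact Or.inr hshadow
    · intro w hw
      simp only [List.mem_cons, List.mem_nil_iff, or_false] at hw
      rcases hw with rfl | rfl | rfl | rfl
      · exact hstack
      · right
        right
        refine ⟨_, _, t2, ?_, ?_, ?_⟩
        · omega
        · rw [hrdi]
          unfold cwBlock
          exact Nat.le_refl _
        · rw [hrdi]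
          unfold cwBlock
          rw [Codebook.N_sparse hne]
          exact Nat.le_refl _
      · right
        left
        refine ⟨_, hb.sparse_lengths hsp, ?_, ?_⟩
        · rw [hrdi]
          unfold clBlock
          exact Nat.le_refl _
        · rw [hrdi]
          unfold clBlock
          rw [Codebook.N_sparse hne]
          exact Nat.le_refl _
      · right
        right
        refine ⟨_, _, t3, ?_, ?_, ?_⟩
        · omega
        · rw [hrcx]
          exact Nat.le_refl _
        · rw [hrcx, hrdi]
          exact Nat.le_refl _

/-- A footprint with more windows. -/
theorem sameExcept_weaken {ws ws' : List Span} {m m' : Mem} (h : Mem.SameExcept ws m m')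
    (hsub : ∀ w, w ∈ ws → w ∈ ws') : Mem.SameExcept ws' m m' := by
  apply h.mono
  intro w hw a a1 a2
  exact ⟨w, hsub w hw, a1, a2⟩
/-- **A window that an ERROR EXIT may write besides the callees' stack**: `[R − 408, R)` — the room below the steady stack pointer:
pushed return addresses, the callees' frames — or a window inside `[f + 132, f + 144)` = `temp_offset`, `eof`, `error` of `*f`
(setup_temp_free's machine-level footprint `[f + 132, f + 136)`; error's `[f + 140, f + 144)`). None of them is read by `Frame`, by
`Env`, by `DeinitOK` (its nine fields: `DeinitOK.wins`) or by `Bits` (its four: `Bits.SameFields`). -/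
def FailWin (g : Ghost) (w : Span) : Prop :=
  (g.R - 408 ≤ w.lo ∧ w.hi ≤ g.R) ∨ (g.f + 132 ≤ w.lo ∧ w.hi ≤ g.f + 144)

/-- A `FailWin` is a window that `Frame` does not read (`P2.FrameWin`: the stack below `[R + 8]`, or inside `*f`). -/
theorem FailWin.frameWin {g : Ghost} {w : Span} (geo : P2.Geo g) (h : FailWin g w) : P2.FrameWin g w := by
  obtain ⟨r1, r2, a2, a3, hobj, hlo, hhi, hlg⟩ := geo
  unfold FailWin at h
  unfold P2.FrameWin
  omega

/-- **SD.ERR (`Failed`) FROM CUR(i) OVER THE FOOTPRINT OF AN ERROR EXIT THAT DOES NOT KEEP THE ARENA LAYER** — the failure piece of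
C7 / C8: `setup_temp_free(f, values, 0)` through its MACHINE-LEVEL contract moves `temp_offset` by 32 although the top temp block is
not `values` (a LIFO violation the C source accepts because it returns an error next: S4), so `ArenaOK`, hence `Cur`, does NOT hold
in the new memory and `Cur.failed` cannot be used THERE. It is used at the old memory, and `Failed` is carried: `Env` reads the
shadow only (`Env.eqOn`); `Bits` its four fields of `*f` (`Bits.frame_fields`); `DeinitOK` nine fields of `*f`, none in `[132, 144)`,
and the contents of the residue block (there is none yet: `RestZero`) and of the codebooks block (a setup block of the arena: off the
stack, and `*f` lies outside the arena's buffer); `ArenaErr` no memory at all.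
WHEN: the `AtERR` exit of a segment of the codebook part after a call of `setup_temp_free.weakSpec` (with or without `error` after
it). HOW: `hs` = the ONE `Mem.SameExcept` from the segment's entry state `v` to the exit state (pushes by `Mem.SameExcept.writeLE` /
`.step_writeLE`, each callee's `w_same` widened by `C7.sameExcept_weaken`, chained by `.trans`; a shadow window of a footprint is
dropped with `C7.sameExcept_drop_shadow`); `hsh` = the chain of the `ShadowUntouched` of the posts (`setup_temp_free.weak_zero` for
`sz = 0`). The `Frame` of the exit: `P2.frame_carry_win` with `FailWin.frameWin`. -/
theorem failed_carry {u₀ : State} {g : Ghost} {pc : Word} {i : Nat} {A2 A3 Ai : Arena} {A : Arena × List Obj} {v : State}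
    {mem' : Mem} (hfr : Frame u₀ g pc A v) (hcur : Cur g i A2 A3 Ai A v) {ws : List Span}
    (hs : Mem.SameExcept ws v.mem mem') (hsh : Mem.EqOn 0xC00000 0xE00000 v.mem mem')
    (hw : ∀ w, w ∈ ws → FailWin g w) : Failed g.len g.f (g.Live A) A mem' := by
  have geo : P2.Geo g := P2.geo_of hfr hcur.hand hcur.sd.env.ok hcur.sd.bits
  obtain ⟨r1, r2, a2, a3, hobj, hlo, hhi, hlg⟩ := geo
  have ha := hcur.sd.arena
  have hout := hcur.hand.objOut
  simp only [voff] at hout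
  obtain ⟨⟨henv, hde, hbits⟩, harena⟩ := hcur.failed
  -- `Bits`: its four fields of `*f` read the same
  have hsf : Bits.SameFields v.mem mem' g.f := by
    apply Bits.SameFields.of_sameExcept hs
    all_goals
      intro w hww
      have := hw w hww
      unfold FailWin at this
      omega
  -- `DeinitOK`: its nine fields of `*f`
  have hoe : ObjEq DeinitOK.wins v.mem g.f mem' g.f := by
    apply ObjEq.of_eqOn
    · intro w hww
      simp only [DeinitOK.wins, List.mem_cons, List.mem_nil_iff, or_false] at hww
      rcases hww with rfl | rfl | rfl | rfl | rfl <;> simp only [] <;> omega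
    · intro w hww
      apply hs.eqOn
      intro x hx
      have := hw x hx
      unfold FailWin at this
      simp only [DeinitOK.wins, List.mem_cons, List.mem_nil_iff, or_false] at hww
      rcases hww with rfl | rfl | rfl | rfl | rfl <;> simp only [] <;> omega
  -- the codebooks block: a setup block of the arena
  have hcbA : A.1.Blk (codebooksBlock v.mem g.f) := hcur.ages.cbOK.F2.mono hcur.ages.exti
  have hcbK : (codebooksBlock v.mem g.f).Kept v.mem mem' := by
    apply Block.Kept.of_sameExcept hs
    · intro w hww
      have hst := ha.blk_off_stack hcbA
      have hin := arena_inside ha hcbA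
      have := hw w hww
      unfold FailWin at this
      omega
    · exact ha.blkOK.no_wrap hcbA
  have hres0 : stb_vorbis.residue_config v.mem g.f = 0 :=
    (hcur.sd.rest.residue_null (restFrom_le_residue (by omega))).1
  refine ⟨⟨henv.eqOn hsh, ?_, hbits.frame_fields hsf⟩, harena⟩
  apply hde.transfer hoe hde.ob1
  · intro hnz
    exact absurd hres0 hnz
  · intro _
    exact hcbK
  · intro _ _ hb
    exact hb

/-- **THE WHOLE `AtERR` EXIT OF A FAILURE PIECE THAT DOES NOT KEEP THE ARENA LAYER** (`P2.frame_carry_win` + `failed_carry`): from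
`Frame` and CUR(i) at the segment's entry state `v`, ONE footprint of `FailWin` windows from `v` to the exit state `w` (at the
single epilogue 0x113b22), the shadow untouched, and `rax = 0` (error's post; the `jmp` keeps it).
WHEN: the last goal of segment C7b (both arms); a failure arm of C8. HOW: see `failed_carry` for `hs`, `hsh`; `hrsp` from the
walker's `w_rsp` and the prelude's `c_rsp`; `hcode` is the walker's `w_eq`; `hinv` by `Vorbis.abiInv_of w_df w_mx` or `v_inv`. -/
theorem fail_exit {u₀ : State} {g : Ghost} {pc : Word} {i : Nat} {A2 A3 Ai : Arena} {A : Arena × List Obj} {v w : State}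
    (hfr : Frame u₀ g pc A v) (hcur : Cur g i A2 A3 Ai A v) {ws : List Span}
    (hs : Mem.SameExcept ws v.mem w.mem) (hsh : ShadowUntouched v.mem w.mem) (hw : ∀ x, x ∈ ws → FailWin g x)
    (hrip : w.rip = pc_ERR) (hrsp : w.reg .rsp = v.reg .rsp) (hcode : CodeOK u₀ w.mem) (hinv : abiInv w)
    (hrax : w.reg .rax = 0) : AtERR u₀ g w := by
  have geo : P2.Geo g := P2.geo_of hfr hcur.hand hcur.sd.env.ok hcur.sd.bits
  have hfr' : Frame u₀ g pc_ERR A w :=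
    P2.frame_carry_win hfr geo hrip hrsp hcode hinv hs (fun x hx => (hw x hx).frameWin geo) hsh
  refine ⟨A, hfr', hcur.hand, Or.inl ⟨?_, failed_carry hfr hcur hs hsh hw⟩⟩
  rw [hrax]
  rfl

end C7

/-- **`AtC7F i`, 0x1149ba = `L.start_decoder.at_1149ba`** (`mov rbp, [rsp+18H]`; the `je` of 0x1146ef taken: compute_codewords
returned 0; exit of `C7a`, entry of `C7b`; line 3847): everything of `AtC7` for the memory after the failed call — `Frame` at the
new address and `Built` (slot `[R+18H]` = f, r14 = c, r12 = values, temps = [P3, P2, P1] for a sparse book: all that the failure piece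
reads) — and eax = 0. -/
structure InC7F (u₀ : State) (g : Ghost) (i : Nat) (A2 A3 Ai Aw : Arena) (A : Arena × List Obj) (lengths values : Nat)
    (v : State) : Prop where
  /-- the common part at 0x1149ba -/
  frame : Frame u₀ g Vorbis.L.start_decoder.at_1149ba A v
  /-- the state of the book: compute_codewords wrote only `codewords` (dense) / P2, P3, `codeword_lengths` (sparse) and its own stack -/
  built : Built g i A2 A3 Ai Aw A lengths values v
  /-- eax = 0 (`test eax, eax ; je`), in the walker's form; nothing after 0x1149ba reads it -/
  result : (Word.part .w32 (v.reg .rax)).toNat = 0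

/-- `BodyC7F`: `InC7F` for some ghost snapshots. -/
def BodyC7F (u₀ : State) (g : Ghost) (i : Nat) (A : Arena × List Obj) (lengths values : Nat) (v : State) : Prop :=
  ∃ A2 A3 Ai Aw, InC7F u₀ g i A2 A3 Ai Aw A lengths values v

/-- `AtC7F i`: `BodyC7F` for some ghost arena, `lengths` and `values` arrays. -/
def AtC7F (u₀ : State) (g : Ghost) (i : Nat) (v : State) : Prop := ∃ A lengths values, BodyC7F u₀ g i A lengths values v

/-- The common part `Frame` of `BodyC7F`, whatever the ghost snapshots are. -/
theorem BodyC7F.frame {u₀ : State} {g : Ghost} {i : Nat} {A : Arena × List Obj} {lengths values : Nat} {v : State}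
    (h : BodyC7F u₀ g i A lengths values v) : Frame u₀ g Vorbis.L.start_decoder.at_1149ba A v := by
  obtain ⟨_, _, _, _, hi⟩ := h
  exact hi.frame

/-- **Segment `start_decoder.C7a`** (0x1146d2–0x1146ef, line 3846: the check of `c->entries`, `compute_codewords(c, lengths,
c->entries, values)`, the test of its result): `AtC8` when it returned non-zero (with VAL for a sparse book), `AtC7F` when it
returned 0. -/
def SegC7a (Lay : Layout) (μ : Microarch) (u₀ : State) : Prop :=
  ∀ (g : Ghost) (i : Nat) (v : State), AtC7 u₀ g i v → ReachVia Lay μ WayInv v (fun w => AtC8 u₀ g i w ∨ AtC7F u₀ g i w)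

/-- **Segment `start_decoder.C7b`** (0x1149ba–0x1149f1, lines 3847–3848: `if (c->sparse) setup_temp_free(f, values, 0); return
error(f, VORBIS_invalid_setup)`): the failure piece ends at the single epilogue with eax = 0 and SD.ERR. -/
def SegC7b (Lay : Layout) (μ : Microarch) (u₀ : State) : Prop :=
  ∀ (g : Ghost) (i : Nat) (v : State), AtC7F u₀ g i v → ReachVia Lay μ WayInv v (fun w => AtERR u₀ g w)

/-- **Segment C7 from its two parts**: C7a reaches `AtC8` (done) or `AtC7F`, C7b goes on from there to `AtERR`. -/
theorem SegC7.of_parts {Lay : Layout} {μ : Microarch} {u₀ : State} (ha : SegC7a Lay μ u₀) (hb : SegC7b Lay μ u₀) :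
    SegC7 Lay μ u₀ := by
  intro g i v hat
  refine (ha g i v hat).trans ?_
  intro w hw
  rcases hw with h8 | hF
  · exact ReachVia.done (Or.inl h8)
  · refine (hb g i w hF).mono ?_
    intro x hx
    exact Or.inr hx

end Vorbis.Spec.StartDecoder
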